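-- pv_equiv track=rewrite | github.com/TongWu/JAVDB_AutoSpider | utils/infra/db.py | _moviehistory_actor_columns_physical_order_ok
-- ===== SOURCE A (Python) =====
-- from typing import Any, Dict, List, Optional, Tuple
--
-- def _moviehistory_actor_columns_all_present(names: List[str]) -> bool:
--     req = frozenset(
--         ("ActorName", "ActorGender", "ActorLink", "SupportingActors"),
--     )
--     return req.issubset(set(names))
--
-- def _moviehistory_actor_columns_physical_order_ok(names: List[str]) -> bool:
--     """True iff the four actor columns appear in storage order: Name < Gender < Link < Supporting."""
--     if not _moviehistory_actor_columns_all_present(names):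
--         return False
--     idx = {k: names.index(k) for k in ("ActorName", "ActorGender", "ActorLink", "SupportingActors")}
--     return (
--         idx["ActorName"]
--         < idx["ActorGender"]
--         < idx["ActorLink"]
--         < idx["SupportingActors"]
--     )
-- ===== SOURCE B (Python) =====
-- def _moviehistory_actor_columns_physical_order_ok(names):
--     expected = ["ActorName", "ActorGender", "ActorLink", "SupportingActors"]
--     seen = set()
--     seq = []
--     for n in names:
--         if n in expected and n not in seen:
--             seen.add(n)
--             seq.append(n)
--     return seq == expected
-- ===== Notes on version B (the rewrite author's own statement) =====
-- stated objective: simpler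
-- what changed: Replaces the subset check plus index-dict plus chained comparison with one pass that collects the first-occurrence subsequence of the four target columns and compares it to the expected literal list.
import Mathlib
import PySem

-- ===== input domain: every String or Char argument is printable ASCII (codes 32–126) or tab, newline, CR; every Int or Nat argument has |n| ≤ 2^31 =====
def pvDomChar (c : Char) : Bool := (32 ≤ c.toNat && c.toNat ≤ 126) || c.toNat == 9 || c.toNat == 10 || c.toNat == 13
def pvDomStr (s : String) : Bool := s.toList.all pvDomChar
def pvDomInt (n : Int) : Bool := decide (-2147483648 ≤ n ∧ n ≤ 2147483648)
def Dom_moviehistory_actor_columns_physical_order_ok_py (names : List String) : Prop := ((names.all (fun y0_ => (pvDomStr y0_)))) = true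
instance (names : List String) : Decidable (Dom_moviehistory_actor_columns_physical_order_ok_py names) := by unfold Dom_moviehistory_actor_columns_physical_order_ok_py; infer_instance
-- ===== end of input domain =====

-- B replaces A's subset check + index dict + chained comparison by one pass collecting the
-- first-occurrence subsequence of the four target columns, compared to the expected literal list (simpler).

-- ===== PORT A =====
-- the frozenset literal of required columns
def pvReq : List String := ["ActorName", "ActorGender", "ActorLink", "SupportingActors"]

-- _moviehistory_actor_columns_all_present
def pvAllPresent (names : List String) : Bool :=
  PySem.Set.issubset (PySem.Set.ofList pvReq) (PySem.Set.ofList names)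

def moviehistory_actor_columns_physical_order_ok_py (names : List String) : Bool :=
  if !pvAllPresent names then false
  else
    -- dict comprehension {k: names.index(k) for k in (...)}; the guard above guarantees every
    -- key is present, so names.index cannot raise and `.getD 0` is exact here
    let idx : PySem.Dict String Nat :=
      PySem.Dict.ofList (pvReq.map (fun k => (k, (PySem.List.index? names k).getD 0)))
    decide (idx.getD "ActorName" 0 < idx.getD "ActorGender" 0) &&
    decide (idx.getD "ActorGender" 0 < idx.getD "ActorLink" 0) &&
    decide (idx.getD "ActorLink" 0 < idx.getD "SupportingActors" 0)

-- ===== PORT B =====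
def pvExpected : List String := ["ActorName", "ActorGender", "ActorLink", "SupportingActors"]

-- the for-loop of B: state (seen, seq)
def pvAltLoop (names : List String) (seen : PySem.Set String) (seq : List String) : List String :=
  match names with
  | [] => seq
  | n :: rest =>
    if pvExpected.contains n && !(PySem.Set.contains seen n) then
      pvAltLoop rest (PySem.Set.add seen n) (seq ++ [n])
    else
      pvAltLoop rest seen seq

def moviehistory_actor_columns_physical_order_ok_py_alt (names : List String) : Bool :=
  pvAltLoop names PySem.Set.empty [] == pvExpected

-- ===== PRECONDITION & SPEC =====
def Spec_moviehistory_actor_columns_physical_order_ok_py (names : List String) (out : Bool) : Prop := out = moviehistory_actor_columns_physical_order_ok_py_alt names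
instance (names : List String) (out : Bool) : Decidable (Spec_moviehistory_actor_columns_physical_order_ok_py names out) := by unfold Spec_moviehistory_actor_columns_physical_order_ok_py; infer_instance

-- ===== CLAIM (what is proved, stated in full; the proofs are below) =====
def Claim_equal_moviehistory_actor_columns_physical_order_ok_py : Prop := ∀ (names : List String), Dom_moviehistory_actor_columns_physical_order_ok_py names → Spec_moviehistory_actor_columns_physical_order_ok_py names (moviehistory_actor_columns_physical_order_ok_py names)

-- ===== LEMMAS AND PROOFS =====

-- canonical form of B's loop: first occurrences of the still-missing targets `rem`
def pvFrec (names rem : List String) : List String :=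
  match names with
  | [] => []
  | y :: ys => if y ∈ rem then y :: pvFrec ys (rem.erase y) else pvFrec ys rem

-- "the elements of rem occur in names with strictly increasing first indices, all > p"
def pvChainFrom (names : List String) (p : Nat) (rem : List String) : Prop :=
  match rem with
  | [] => True
  | x :: rest => ∃ i, PySem.List.index? names x = some i ∧ p < i ∧ pvChainFrom names i rest

def pvChainP (names rem : List String) : Prop :=
  match rem with
  | [] => True
  | x :: rest => ∃ i, PySem.List.index? names x = some i ∧ pvChainFrom names i rest

theorem pvAltLoop_eq_frec (names : List String) : ∀ (seen : PySem.Set String) (seq rem : List String),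
    (∀ x, (pvExpected.contains x = true ∧ PySem.Set.contains seen x = false) ↔ x ∈ rem) →
    rem.Nodup →
    pvAltLoop names seen seq = seq ++ pvFrec names rem := by
  induction names with
  | nil => intro seen seq rem _ _; simp [pvAltLoop, pvFrec]
  | cons y ys ih =>
    intro seen seq rem H hnd
    by_cases hy : y ∈ rem
    · have hcond : (pvExpected.contains y && !(PySem.Set.contains seen y)) = true := by
        have hm := (H y).mpr hy
        rw [hm.1, hm.2]
        rfl
      have H' : ∀ x, (pvExpected.contains x = true ∧ PySem.Set.contains (PySem.Set.add seen y) x = false) ↔ x ∈ rem.erase y := by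
        intro x
        rw [hnd.mem_erase_iff, ← H x]
        constructor
        · rintro ⟨h1, h2⟩
          have hx : x ∉ PySem.Set.add seen y := by simp [PySem.Set.contains_iff] at h2 ⊢; exact h2
          rw [PySem.Set.mem_add] at hx
          push_neg at hx
          refine ⟨hx.2, h1, ?_⟩
          simp [PySem.Set.contains_iff]; exact hx.1
        · rintro ⟨hne, h1, h2⟩
          refine ⟨h1, ?_⟩
          have : x ∉ PySem.Set.add seen y := by
            rw [PySem.Set.mem_add]
            push_neg
            exact ⟨by simpa [PySem.Set.contains_iff] using h2, hne⟩
          simpa [PySem.Set.contains_iff] using this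
      rw [pvAltLoop, if_pos hcond, ih _ _ _ H' (hnd.erase y), pvFrec, if_pos hy]
      simp
    · have hcond : ¬ ((pvExpected.contains y && !(PySem.Set.contains seen y)) = true) := by
        intro hc
        rw [Bool.and_eq_true, Bool.not_eq_true'] at hc
        exact hy ((H y).mp ⟨hc.1, hc.2⟩)
      rw [pvAltLoop, if_neg hcond, ih _ _ _ H hnd, pvFrec, if_neg hy]

theorem pvChainFrom_shift (y : String) (ys : List String) (p : Nat) :
    ∀ rem : List String, (∀ x ∈ rem, x ≠ y) →
    (pvChainFrom (y :: ys) (p + 1) rem ↔ pvChainFrom ys p rem) := by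
  intro rem
  induction rem generalizing p with
  | nil => intro _; simp [pvChainFrom]
  | cons x rest ih =>
    intro h
    have hxy : x ≠ y := h x (by simp)
    rw [pvChainFrom, pvChainFrom]
    constructor
    · rintro ⟨i, hi, hpi, hc⟩
      rw [PySem.List.index?_cons_of_ne ys (Ne.symm hxy)] at hi
      rcases Option.map_eq_some_iff.mp hi with ⟨i', hi', rfl⟩
      exact ⟨i', hi', by omega, (ih i' (fun z hz => h z (by simp [hz]))).mp (by simpa using hc)⟩
    · rintro ⟨i, hi, hpi, hc⟩
      refine ⟨i + 1, ?_, by omega, ?_⟩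
      · rw [PySem.List.index?_cons_of_ne ys (Ne.symm hxy), hi]; rfl
      · exact (ih i (fun z hz => h z (by simp [hz]))).mpr hc

theorem pvChainFrom_zero (y : String) (ys : List String) :
    ∀ rem : List String, (∀ x ∈ rem, x ≠ y) →
    (pvChainFrom (y :: ys) 0 rem ↔ pvChainP ys rem) := by
  intro rem h
  cases rem with
  | nil => simp [pvChainFrom, pvChainP]
  | cons x rest =>
    have hxy : x ≠ y := h x (by simp)
    rw [pvChainFrom, pvChainP]
    constructor
    · rintro ⟨i, hi, _, hc⟩
      rw [PySem.List.index?_cons_of_ne ys (Ne.symm hxy)] at hi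
      rcases Option.map_eq_some_iff.mp hi with ⟨i', hi', rfl⟩
      exact ⟨i', hi', (pvChainFrom_shift y ys i' rest (fun z hz => h z (by simp [hz]))).mp (by simpa using hc)⟩
    · rintro ⟨i, hi, hc⟩
      refine ⟨i + 1, ?_, by omega, ?_⟩
      · rw [PySem.List.index?_cons_of_ne ys (Ne.symm hxy), hi]; rfl
      · exact (pvChainFrom_shift y ys i rest (fun z hz => h z (by simp [hz]))).mpr hc

theorem pvChainP_shift (y : String) (ys : List String) (rem : List String)
    (h : y ∉ rem) : pvChainP (y :: ys) rem ↔ pvChainP ys rem := by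
  cases rem with
  | nil => simp [pvChainP]
  | cons x rest =>
    have hxy : x ≠ y := fun he => h (by simp [he])
    have hr : ∀ z ∈ rest, z ≠ y := fun z hz he => h (by simp [he ▸ hz])
    rw [pvChainP, pvChainP]
    constructor
    · rintro ⟨i, hi, hc⟩
      rw [PySem.List.index?_cons_of_ne ys (Ne.symm hxy)] at hi
      rcases Option.map_eq_some_iff.mp hi with ⟨i', hi', rfl⟩
      exact ⟨i', hi', (pvChainFrom_shift y ys i' rest hr).mp (by simpa using hc)⟩
    · rintro ⟨i, hi, hc⟩
      refine ⟨i + 1, ?_, ?_⟩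
      · rw [PySem.List.index?_cons_of_ne ys (Ne.symm hxy), hi]; rfl
      · exact (pvChainFrom_shift y ys i rest hr).mpr hc

theorem pvChainFrom_mem (names : List String) : ∀ (p : Nat) (rem : List String), pvChainFrom names p rem →
    ∀ y ∈ rem, ∃ j, PySem.List.index? names y = some j ∧ p < j := by
  intro p rem
  induction rem generalizing p with
  | nil => intro _ y hy; simp at hy
  | cons x rest ih =>
    rintro ⟨i, hi, hpi, hc⟩ y hy
    rcases List.mem_cons.mp hy with rfl | hy'
    · exact ⟨i, hi, hpi⟩
    · rcases ih i hc y hy' with ⟨j, hj, hij⟩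
      exact ⟨j, hj, by omega⟩

theorem pvFrec_iff_chain (names : List String) : ∀ rem : List String, rem.Nodup →
    (pvFrec names rem = rem ↔ pvChainP names rem) := by
  induction names with
  | nil =>
    intro rem _
    cases rem with
    | nil => simp [pvFrec, pvChainP]
    | cons x rest =>
      simp only [pvFrec, pvChainP]
      constructor
      · intro h; exact absurd h (by simp)
      · rintro ⟨i, hi, _⟩
        rw [show PySem.List.index? ([] : List String) x = none from rfl] at hi
        exact absurd hi (by simp)
  | cons y ys ih =>
    intro rem hnd
    by_cases hy : y ∈ rem
    · cases rem with
      | nil => simp at hy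
      | cons r0 rest =>
        by_cases hyr : y = r0
        · subst hyr
          have herase : (y :: rest).erase y = rest := by simp
          have hrest : ∀ x ∈ rest, x ≠ y := fun x hx he =>
            (List.nodup_cons.mp hnd).1 (he ▸ hx)
          rw [pvFrec, if_pos hy, herase]
          constructor
          · intro h
            have h2 : pvFrec ys rest = rest := by simpa using h
            have := (ih rest (List.nodup_cons.mp hnd).2).mp h2
            exact ⟨0, PySem.List.index?_cons_self y ys, (pvChainFrom_zero y ys rest hrest).mpr this⟩
          · rintro ⟨i, hi, hc⟩
            rw [PySem.List.index?_cons_self] at hi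
            cases hi
            have := (pvChainFrom_zero y ys rest hrest).mp hc
            rw [(ih rest (List.nodup_cons.mp hnd).2).mpr this]
        · have hyrest : y ∈ rest := by
            rcases List.mem_cons.mp hy with h | h
            · exact absurd h hyr
            · exact h
          rw [pvFrec, if_pos hy]
          constructor
          · intro h
            exact absurd (List.cons.injEq .. ▸ h).1 hyr
          · rintro ⟨i, hi, hc⟩
            rcases pvChainFrom_mem (y :: ys) i rest hc y hyrest with ⟨j, hj, hij⟩
            rw [PySem.List.index?_cons_self] at hj
            cases hj
            omega
    · rw [pvFrec, if_neg hy, pvChainP_shift y ys rem hy]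
      exact ih rem hnd

-- B's result characterised
theorem pvAlt_iff_chain (names : List String) :
    moviehistory_actor_columns_physical_order_ok_py_alt names = true ↔ pvChainP names pvExpected := by
  unfold moviehistory_actor_columns_physical_order_ok_py_alt
  have hH : ∀ x, (pvExpected.contains x = true ∧ PySem.Set.contains PySem.Set.empty x = false) ↔ x ∈ pvExpected := by
    intro x
    simp [PySem.Set.contains_iff, PySem.Set.empty]
  have hnd : pvExpected.Nodup := by decide
  rw [pvAltLoop_eq_frec names PySem.Set.empty [] pvExpected hH hnd]
  simp only [List.nil_append, beq_iff_eq]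
  exact pvFrec_iff_chain names pvExpected hnd

-- A's result characterised
theorem pvA_iff_chain (names : List String) :
    moviehistory_actor_columns_physical_order_ok_py names = true ↔ pvChainP names pvExpected := by
  unfold moviehistory_actor_columns_physical_order_ok_py
  by_cases hp : pvAllPresent names = true
  · rw [hp]
    simp only [Bool.not_true, Bool.false_eq_true, if_false]
    have hmemA : "ActorName" ∈ names := by
      have := (PySem.Set.issubset_iff _ _).mp hp "ActorName" (by simp [pvReq, PySem.Set.mem_ofList])
      simpa [PySem.Set.mem_ofList] using this
    have hmemG : "ActorGender" ∈ names := by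
      have := (PySem.Set.issubset_iff _ _).mp hp "ActorGender" (by simp [pvReq, PySem.Set.mem_ofList])
      simpa [PySem.Set.mem_ofList] using this
    have hmemL : "ActorLink" ∈ names := by
      have := (PySem.Set.issubset_iff _ _).mp hp "ActorLink" (by simp [pvReq, PySem.Set.mem_ofList])
      simpa [PySem.Set.mem_ofList] using this
    have hmemS : "SupportingActors" ∈ names := by
      have := (PySem.Set.issubset_iff _ _).mp hp "SupportingActors" (by simp [pvReq, PySem.Set.mem_ofList])
      simpa [PySem.Set.mem_ofList] using this
    rcases Option.isSome_iff_exists.mp ((PySem.List.index?_isSome_iff _ _).mpr hmemA) with ⟨iA, hiA⟩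
    rcases Option.isSome_iff_exists.mp ((PySem.List.index?_isSome_iff _ _).mpr hmemG) with ⟨iG, hiG⟩
    rcases Option.isSome_iff_exists.mp ((PySem.List.index?_isSome_iff _ _).mpr hmemL) with ⟨iL, hiL⟩
    rcases Option.isSome_iff_exists.mp ((PySem.List.index?_isSome_iff _ _).mpr hmemS) with ⟨iS, hiS⟩
    simp only [pvReq, List.map_cons, List.map_nil, hiA, hiG, hiL, hiS, Option.getD_some]
    have e1 : ∀ x ∈ ([("ActorName", iA), ("ActorGender", iG), ("ActorLink", iL), ("SupportingActors", iS)] : List (String × Nat)), True := by simp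
    have g1 : (PySem.Dict.ofList [("ActorName", iA), ("ActorGender", iG), ("ActorLink", iL), ("SupportingActors", iS)]).getD "ActorName" 0 = iA := by
      simp [PySem.Dict.ofList, PySem.Dict.getD, PySem.Dict.get?, PySem.Dict.insert, PySem.Dict.empty, PySem.Dict.update, PySem.Dict.contains, List.find?]
    have g2 : (PySem.Dict.ofList [("ActorName", iA), ("ActorGender", iG), ("ActorLink", iL), ("SupportingActors", iS)]).getD "ActorGender" 0 = iG := by
      simp [PySem.Dict.ofList, PySem.Dict.getD, PySem.Dict.get?, PySem.Dict.insert, PySem.Dict.empty, PySem.Dict.update, PySem.Dict.contains, List.find?]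
    have g3 : (PySem.Dict.ofList [("ActorName", iA), ("ActorGender", iG), ("ActorLink", iL), ("SupportingActors", iS)]).getD "ActorLink" 0 = iL := by
      simp [PySem.Dict.ofList, PySem.Dict.getD, PySem.Dict.get?, PySem.Dict.insert, PySem.Dict.empty, PySem.Dict.update, PySem.Dict.contains, List.find?]
    have g4 : (PySem.Dict.ofList [("ActorName", iA), ("ActorGender", iG), ("ActorLink", iL), ("SupportingActors", iS)]).getD "SupportingActors" 0 = iS := by
      simp [PySem.Dict.ofList, PySem.Dict.getD, PySem.Dict.get?, PySem.Dict.insert, PySem.Dict.empty, PySem.Dict.update, PySem.Dict.contains, List.find?]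
    rw [g1, g2, g3, g4]
    constructor
    · intro h
      simp only [Bool.and_eq_true, decide_eq_true_eq] at h
      refine ⟨iA, hiA, iG, hiG, h.1.1, iL, hiL, h.1.2, iS, hiS, h.2, trivial⟩
    · rintro ⟨i, hi, j, hj, hij, k, hk, hjk, l, hl, hkl, -⟩
      rw [hiA] at hi; cases hi
      rw [hiG] at hj; cases hj
      rw [hiL] at hk; cases hk
      rw [hiS] at hl; cases hl
      simp only [Bool.and_eq_true, decide_eq_true_eq]
      exact ⟨⟨hij, hjk⟩, hkl⟩
  · rw [Bool.not_eq_true] at hp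
    rw [hp]
    simp only [Bool.not_false, if_true]
    constructor
    · intro h; exact absurd h (by simp)
    · intro hc
      exfalso
      rcases hc with ⟨i, hi, hcf⟩
      have hmem : ∀ x ∈ pvExpected, x ∈ names := by
        intro x hx
        rcases List.mem_cons.mp hx with rfl | hx'
        · exact (PySem.List.index?_isSome_iff _ _).mp (by rw [hi]; rfl)
        · rcases pvChainFrom_mem names i _ hcf x hx' with ⟨j, hj, -⟩
          exact (PySem.List.index?_isSome_iff _ _).mp (by rw [hj]; rfl)
      have : pvAllPresent names = true := by
        apply (PySem.Set.issubset_iff _ _).mpr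
        intro x hx
        rw [PySem.Set.mem_ofList] at hx ⊢
        exact hmem x hx
      rw [hp] at this
      exact Bool.false_ne_true this

-- ===== VERDICT (by name: the statement is the Claim_ definition above) =====
theorem moviehistory_actor_columns_physical_order_ok_py_spec : Claim_equal_moviehistory_actor_columns_physical_order_ok_py := by
  intro names _
  unfold Spec_moviehistory_actor_columns_physical_order_ok_py
  rw [Bool.eq_iff_iff, pvA_iff_chain, pvAlt_iff_chain]
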